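-- pv_equiv track=rewrite | github.com/PermutaTriangle/Permuta | permuta/bisc/bisc_subfunctions.py | maximal_mesh_pattern_of_occurrence
-- ===== SOURCE A (Python) =====
-- def maximal_mesh_pattern_of_occurrence(perm, occ):
--     """Return the maximal shading M of the classical pattern std(occ) so
--     that the given occurrence is an occurrence of the mesh pattern
--     (std(occ), M).
--     """
--
--     k = len(occ)
--
--     con = set(perm[i] for i in occ)
--     colcnt = 0
--     col = [-1] * len(perm)
--     for v in perm:
--         if v in con:
--             colcnt += 1
--         else:
--             col[v] = colcnt
--     rowcnt = 0
--     row = [-1] * len(perm)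
--     for v in range(len(perm)):
--         if v in con:
--             rowcnt += 1
--         else:
--             row[v] = rowcnt
--     # bad is the set of boxes that contain points and can not be shaded
--     bad = set((u, v) for u, v in zip(col, row) if u != -1)
--     # cur is the set of boxes that can be shaded
--     cur = set((u, v) for u in range(k + 1) for v in range(k + 1) if (u, v) not in bad)
--     return cur
-- ===== SOURCE B (Python) =====
-- def maximal_mesh_pattern_of_occurrence(perm, occ):
--     """Return the maximal shading M of the classical pattern std(occ) so
--     that the given occurrence is an occurrence of the mesh pattern
--     (std(occ), M).
--     """
--     k = len(occ)
--     n = len(perm)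
--     con = set(perm[i] for i in occ)
--     occpos = [p for p, v in enumerate(perm) if v in con]
--     occvals = [t for t in range(n) if t in con]
--     # each point outside the occurrence lies in the box given by its rank
--     # among the occurrence positions and its rank among the occurrence values
--     col = [-1] * n
--     row = [-1] * n
--     for p, v in enumerate(perm):
--         if v not in con:
--             col[v] = sum(1 for q in occpos if q < p)
--     for t in range(n):
--         if t not in con:
--             row[t] = sum(1 for c in occvals if c < t)
--     bad = set((u, w) for u, w in zip(col, row) if u != -1)
--     return set((u, w) for u in range(k + 1) for w in range(k + 1) if (u, w) not in bad)
-- ===== Notes on version B (the rewrite author's own statement) =====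
-- stated objective: alternative
-- what changed: Replaces A's two incremental counting passes (running counters colcnt/rowcnt threaded through the loops) by per-point rank counting: the lists of occurrence positions and occurrence values are precomputed once and each point's box coordinates are obtained by counting the occurrence positions before it and the occurrence values below it; Pre_ excludes only the inputs where A raises IndexError (out-of-range occurrence indices or out-of-range non-occurrence values), where B raises too.
import Mathlib
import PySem

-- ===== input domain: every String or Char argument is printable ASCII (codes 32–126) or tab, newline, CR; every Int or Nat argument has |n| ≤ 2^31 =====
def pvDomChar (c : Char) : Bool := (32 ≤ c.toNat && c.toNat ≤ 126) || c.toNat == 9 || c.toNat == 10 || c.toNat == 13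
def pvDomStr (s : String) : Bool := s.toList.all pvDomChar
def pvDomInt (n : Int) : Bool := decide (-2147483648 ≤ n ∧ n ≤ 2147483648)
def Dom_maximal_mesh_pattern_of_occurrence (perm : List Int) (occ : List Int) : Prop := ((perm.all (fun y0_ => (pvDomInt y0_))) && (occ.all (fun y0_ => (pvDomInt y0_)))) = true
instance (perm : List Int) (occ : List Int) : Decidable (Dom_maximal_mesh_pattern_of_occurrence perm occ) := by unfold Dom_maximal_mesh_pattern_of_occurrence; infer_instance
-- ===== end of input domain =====

-- B replaces A's two incremental counting passes (running counters threaded through the loops)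
-- by per-point rank counting against the precomputed lists of occurrence positions and
-- occurrence values (objective: alternative; same return value, no mutation of arguments).

-- ===== PORT A =====
-- con = set(perm[i] for i in occ) — both Pythons build this set with this exact expression.
-- pyGetD default 0: Python raises IndexError for out-of-range i; Pre_ excludes that.
def pvCon (perm : List Int) (occ : List Int) : PySem.Set Int :=
  PySem.Set.ofList (occ.map (fun i => PySem.List.pyGetD perm i 0))

-- A's two counting loops are textually identical ('for v in …: if v in con: cnt += 1 else: arr[v] = cnt');
-- pySetD is exact (including negative-index wraparound) where Python's arr[v] = cnt does not
-- raise, and Pre_ excludes exactly the raising case.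
def pvColLoop (con : PySem.Set Int) : List Int → List Int × Int → List Int × Int
  | [], st => st
  | v :: rest, (arr, cnt) =>
    if PySem.Set.contains con v then pvColLoop con rest (arr, cnt + 1)
    else pvColLoop con rest (PySem.List.pySetD arr v cnt, cnt)

def maximal_mesh_pattern_of_occurrence (perm : List Int) (occ : List Int) : List (Int × Int) :=
  let k : Int := (occ.length : Int)
  let con := pvCon perm occ
  let col := (pvColLoop con perm (List.replicate perm.length (-1), 0)).1
  let row := (pvColLoop con (PySem.List.pyRange 0 (perm.length : Int) 1) (List.replicate perm.length (-1), 0)).1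
  let bad : PySem.Set (Int × Int) :=
    PySem.Set.ofList ((col.zip row).filter (fun uv => uv.1 != -1))
  PySem.Set.ofList ((PySem.List.pyRange 0 (k + 1) 1).flatMap (fun u =>
    ((PySem.List.pyRange 0 (k + 1) 1).filter (fun w => !(PySem.Set.contains bad (u, w)))).map (fun w => (u, w))))

-- ===== PORT B =====
def maximal_mesh_pattern_of_occurrence_alt (perm : List Int) (occ : List Int) : List (Int × Int) :=
  let k : Int := (occ.length : Int)
  let n : Int := (perm.length : Int)
  let con := pvCon perm occ
  let occpos := ((PySem.List.enumerate perm 0).filter (fun pv => PySem.Set.contains con pv.2)).map (fun pv => pv.1)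
  let occvals := (PySem.List.pyRange 0 n 1).filter (fun t => PySem.Set.contains con t)
  let col := (PySem.List.enumerate perm 0).foldl (fun a pv =>
      if !(PySem.Set.contains con pv.2) then
        PySem.List.pySetD a pv.2 ((occpos.countP (fun q => decide (q < pv.1)) : Int))
      else a) (List.replicate perm.length (-1))
  let row := (PySem.List.pyRange 0 n 1).foldl (fun a t =>
      if !(PySem.Set.contains con t) then
        PySem.List.pySetD a t ((occvals.countP (fun c => decide (c < t)) : Int))
      else a) (List.replicate perm.length (-1))
  let bad : PySem.Set (Int × Int) :=
    PySem.Set.ofList ((col.zip row).filter (fun uv => uv.1 != -1))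
  PySem.Set.ofList ((PySem.List.pyRange 0 (k + 1) 1).flatMap (fun u =>
    ((PySem.List.pyRange 0 (k + 1) 1).filter (fun w => !(PySem.Set.contains bad (u, w)))).map (fun w => (u, w))))

-- ===== PRECONDITION & SPEC =====
-- Pre_ is exactly the condition under which the Python A returns (no exception): every occurrence
-- index is a valid (possibly negative) index into perm, and every perm value OUTSIDE the
-- occurrence value set is a valid (possibly negative) index into the col array (A never indexes
-- with values inside that set).  B raises in exactly the same situations.
def Pre_maximal_mesh_pattern_of_occurrence (perm : List Int) (occ : List Int) : Prop :=
  (∀ i ∈ occ, -(perm.length : Int) ≤ i ∧ i < (perm.length : Int)) ∧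
  (∀ v ∈ perm, v ∉ occ.map (fun i => PySem.List.pyGetD perm i 0) →
    -(perm.length : Int) ≤ v ∧ v < (perm.length : Int))
instance (perm : List Int) (occ : List Int) : Decidable (Pre_maximal_mesh_pattern_of_occurrence perm occ) := by
  unfold Pre_maximal_mesh_pattern_of_occurrence; infer_instance

def pvWitness_maximal_mesh_pattern_of_occurrence : List Int × List Int := ([1, 0, 2], [0, 2])

def Spec_maximal_mesh_pattern_of_occurrence (perm : List Int) (occ : List Int) (out : List (Int × Int)) : Prop := out = maximal_mesh_pattern_of_occurrence_alt perm occ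
instance (perm : List Int) (occ : List Int) (out : List (Int × Int)) : Decidable (Spec_maximal_mesh_pattern_of_occurrence perm occ out) := by unfold Spec_maximal_mesh_pattern_of_occurrence; infer_instance

-- ===== CLAIM (what is proved, stated in full; the proofs are below) =====
def Claim_equal_maximal_mesh_pattern_of_occurrence : Prop := ∀ (perm : List Int) (occ : List Int), Dom_maximal_mesh_pattern_of_occurrence perm occ → Pre_maximal_mesh_pattern_of_occurrence perm occ → Spec_maximal_mesh_pattern_of_occurrence perm occ (maximal_mesh_pattern_of_occurrence perm occ)

-- ===== LEMMAS AND PROOFS =====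

lemma pyGetD_natcast_getElem (xs : List Int) (p : Nat) (hp : p < xs.length) :
    PySem.List.pyGetD xs (p : Int) 0 = xs[p] := by
  rw [PySem.List.pyGetD_eq_getElem xs 0 (Int.natCast_nonneg p) (by exact_mod_cast hp)]
  simp

lemma mem_enumerate_self (xs : List Int) (p : Nat) (hp : p < xs.length) :
    ((p : Int), xs[p]) ∈ PySem.List.enumerate xs 0 := by
  rw [PySem.List.enumerate_eq_map_pyRange xs (0 : Int)]
  refine List.mem_map.2 ⟨(p : Int), ?_, ?_⟩
  · refine PySem.List.mem_pyRange_one.2 ⟨Int.natCast_nonneg p, ?_⟩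
    rw [PySem.List.len_eq]
    exact_mod_cast hp
  · rw [pyGetD_natcast_getElem xs p hp]

lemma mem_enumerate_char (xs : List Int) (pv : Int × Int) (h : pv ∈ PySem.List.enumerate xs 0) :
    ∃ p : Nat, ∃ hp : p < xs.length, pv = ((p : Int), xs[p]) := by
  rw [PySem.List.enumerate_eq_map_pyRange xs (0 : Int)] at h
  rcases List.mem_map.1 h with ⟨j, hj, rfl⟩
  have hjb := PySem.List.mem_pyRange_one.1 hj
  have hjlen : j < (xs.length : Int) := by
    have h2 := hjb.2
    rwa [PySem.List.len_eq] at h2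
  refine ⟨j.toNat, by omega, ?_⟩
  have hcast : ((j.toNat : Nat) : Int) = j := by omega
  rw [Prod.mk.injEq]
  refine ⟨hcast.symm, ?_⟩
  rw [PySem.List.pyGetD_eq_getElem xs 0 hjb.1 hjlen]

-- counting below s+1 versus below s differs exactly by membership of s (duplicate-free list)
lemma countP_lt_succ (R : List Int) (hnd : R.Nodup) (s : Int) :
    R.countP (fun a => decide (a < s + 1)) =
      R.countP (fun a => decide (a < s)) + (if s ∈ R then 1 else 0) := by
  induction R with
  | nil => simp
  | cons a rest ih =>
    rcases List.nodup_cons.1 hnd with ⟨han, hrest⟩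
    rw [List.countP_cons, List.countP_cons, ih hrest]
    by_cases has : a = s
    · subst has
      rw [if_neg han, if_pos (List.mem_cons_self ..)]
      simp
    · have h1 : (decide (a < s + 1) : Bool) = decide (a < s) := by
        simp only [decide_eq_decide]
        omega
      have h2 : (if s ∈ a :: rest then (1 : Nat) else 0) = (if s ∈ rest then 1 else 0) := by
        by_cases hs : s ∈ rest
        · rw [if_pos hs, if_pos (List.mem_cons_of_mem _ hs)]
        · have hni : s ∉ a :: rest := by
            intro hmem
            rcases List.mem_cons.1 hmem with h | h
            · exact has h.symm
            · exact hs h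
          rw [if_neg hs, if_neg hni]
      rw [h1, h2]
      ring

-- the synchronised loop: A's running counter always equals B's rank in R of the current index,
-- so the two write loops build identical arrays
lemma writes_sync (con : PySem.Set Int) (R : List Int) (hnd : R.Nodup) :
    ∀ (vs : List Int) (s : Int) (arr : List Int) (cnt : Int),
      (∀ pv ∈ PySem.List.enumerate vs s, (pv.1 ∈ R ↔ pv.2 ∈ con)) →
      cnt = (R.countP (fun q => decide (q < s)) : Int) →
      (pvColLoop con vs (arr, cnt)).1 =
        (PySem.List.enumerate vs s).foldl (fun a pv =>
          if !(PySem.Set.contains con pv.2) then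
            PySem.List.pySetD a pv.2 ((R.countP (fun q => decide (q < pv.1)) : Int))
          else a) arr := by
  intro vs
  induction vs with
  | nil =>
    intro s arr cnt _ _
    simp [pvColLoop, PySem.List.enumerate_nil]
  | cons v rest ih =>
    intro s arr cnt hmem hcnt
    rw [PySem.List.enumerate_cons]
    have hhead := hmem (s, v) (by rw [PySem.List.enumerate_cons]; exact List.mem_cons_self ..)
    simp only at hhead
    have htail : ∀ pv ∈ PySem.List.enumerate rest (s + 1), (pv.1 ∈ R ↔ pv.2 ∈ con) := fun pv hpv =>
      hmem pv (by rw [PySem.List.enumerate_cons]; exact List.mem_cons_of_mem _ hpv)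
    simp only [pvColLoop, List.foldl_cons]
    by_cases hcv : PySem.Set.contains con v
    · have hsR : s ∈ R := hhead.2 ((PySem.Set.contains_iff con v).1 hcv)
      simp only [hcv, Bool.not_true, Bool.false_eq_true, if_true, if_false]
      refine ih (s + 1) arr (cnt + 1) htail ?_
      rw [countP_lt_succ R hnd s, if_pos hsR, hcnt]
      push_cast
      ring
    · have hsR : s ∉ R := fun h => hcv ((PySem.Set.contains_iff con v).2 (hhead.1 h))
      have hcv' : PySem.Set.contains con v = false := by simpa using hcv
      simp only [hcv', Bool.not_false, Bool.false_eq_true, if_true, if_false]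
      rw [← hcnt]
      refine ih (s + 1) (PySem.List.pySetD arr v cnt) cnt htail ?_
      rw [countP_lt_succ R hnd s, if_neg hsR, hcnt]
      simp

-- membership in B's occurrence-position list
lemma mem_occpos_iff (perm : List Int) (con : PySem.Set Int) (j : Int) :
    j ∈ ((PySem.List.enumerate perm 0).filter (fun pv => PySem.Set.contains con pv.2)).map (fun pv => pv.1) ↔
      (0 ≤ j ∧ j < (perm.length : Int)) ∧ PySem.List.pyGetD perm j 0 ∈ con := by
  constructor
  · intro h
    rcases List.mem_map.1 h with ⟨pv, hpv, rfl⟩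
    rcases List.mem_filter.1 hpv with ⟨hmem, hc⟩
    rcases mem_enumerate_char perm pv hmem with ⟨p, hp, rfl⟩
    dsimp only at hc ⊢
    refine ⟨⟨Int.natCast_nonneg p, by exact_mod_cast hp⟩, ?_⟩
    rw [pyGetD_natcast_getElem perm p hp]
    exact (PySem.Set.contains_iff _ _).1 hc
  · rintro ⟨⟨hj0, hjn⟩, hjc⟩
    have hpe : PySem.List.pyGetD perm j 0 = perm[j.toNat]'(by omega) :=
      PySem.List.pyGetD_eq_getElem perm 0 hj0 hjn
    refine List.mem_map.2 ⟨(j, PySem.List.pyGetD perm j 0), List.mem_filter.2 ⟨?_, ?_⟩, rfl⟩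
    · have := mem_enumerate_self perm j.toNat (by omega)
      rw [hpe]
      have hcast : ((j.toNat : Nat) : Int) = j := by omega
      rwa [hcast] at this
    · exact (PySem.Set.contains_iff _ _).2 hjc

lemma nodup_occpos (perm : List Int) (con : PySem.Set Int) :
    (((PySem.List.enumerate perm 0).filter (fun pv => PySem.Set.contains con pv.2)).map
      (fun pv => pv.1)).Nodup := by
  have hsub : List.Sublist
      (((PySem.List.enumerate perm 0).filter (fun pv => PySem.Set.contains con pv.2)).map
        (fun pv => pv.1))
      ((PySem.List.enumerate perm 0).map (fun pv => pv.1)) :=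
    List.filter_sublist.map _
  have hnd : ((PySem.List.enumerate perm 0).map (fun pv => pv.1)).Nodup := by
    rw [PySem.List.map_fst_enumerate]
    exact PySem.List.nodup_pyRange_one _ _
  exact hnd.sublist hsub

lemma enumerate_pyRange_zero (n : Int) (hn : 0 ≤ n) :
    PySem.List.enumerate (PySem.List.pyRange 0 n 1) 0 =
      (PySem.List.pyRange 0 n 1).map (fun t => (t, t)) := by
  rw [PySem.List.enumerate_eq_map_pyRange (PySem.List.pyRange 0 n 1) (0 : Int)]
  have hlen : PySem.List.len (PySem.List.pyRange 0 n 1) = n := by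
    rw [PySem.List.len_eq, PySem.List.length_pyRange_one]
    omega
  rw [hlen]
  refine List.map_congr_left ?_
  intro j hj
  have hjb := PySem.List.mem_pyRange_one.1 hj
  have hjlen : j < ((PySem.List.pyRange 0 n 1).length : Int) := by
    rw [PySem.List.length_pyRange_one]
    omega
  rw [PySem.List.pyGetD_eq_getElem _ 0 hjb.1 hjlen, PySem.List.getElem_pyRange_one]
  rw [Prod.mk.injEq]
  refine ⟨rfl, ?_⟩
  omega

-- A's col array equals B's col array
lemma col_eq (perm occ : List Int) :
    (pvColLoop (pvCon perm occ) perm (List.replicate perm.length (-1), 0)).1 =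
      (PySem.List.enumerate perm 0).foldl (fun a pv =>
        if !(PySem.Set.contains (pvCon perm occ) pv.2) then
          PySem.List.pySetD a pv.2
            (((((PySem.List.enumerate perm 0).filter (fun pv => PySem.Set.contains (pvCon perm occ) pv.2)).map
              (fun pv => pv.1)).countP (fun q => decide (q < pv.1)) : Int))
        else a) (List.replicate perm.length (-1)) := by
  refine writes_sync (pvCon perm occ) _ (nodup_occpos perm (pvCon perm occ)) perm 0
    (List.replicate perm.length (-1)) 0 ?_ ?_
  · intro pv hpv
    rcases mem_enumerate_char perm pv hpv with ⟨p, hp, rfl⟩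
    rw [mem_occpos_iff perm (pvCon perm occ) (p : Int)]
    rw [pyGetD_natcast_getElem perm p hp]
    constructor
    · intro h
      exact h.2
    · intro h
      exact ⟨⟨Int.natCast_nonneg p, by exact_mod_cast hp⟩, h⟩
  · have h0 : (((PySem.List.enumerate perm 0).filter (fun pv => PySem.Set.contains (pvCon perm occ) pv.2)).map
        (fun pv => pv.1)).countP (fun q => decide (q < (0 : Int))) = 0 := by
      rw [List.countP_eq_zero]
      intro q hq
      have := ((mem_occpos_iff perm (pvCon perm occ) q).1 hq).1.1
      simp only [decide_eq_true_eq]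
      omega
    rw [h0]
    simp

-- A's row array equals B's row array
lemma row_eq (perm occ : List Int) :
    (pvColLoop (pvCon perm occ) (PySem.List.pyRange 0 (perm.length : Int) 1)
        (List.replicate perm.length (-1), 0)).1 =
      (PySem.List.pyRange 0 (perm.length : Int) 1).foldl (fun a t =>
        if !(PySem.Set.contains (pvCon perm occ) t) then
          PySem.List.pySetD a t
            ((((PySem.List.pyRange 0 (perm.length : Int) 1).filter
              (fun t => PySem.Set.contains (pvCon perm occ) t)).countP (fun c => decide (c < t)) : Int))
        else a) (List.replicate perm.length (-1)) := by
  have hVnd : ((PySem.List.pyRange 0 (perm.length : Int) 1).filter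
      (fun t => PySem.Set.contains (pvCon perm occ) t)).Nodup :=
    (PySem.List.nodup_pyRange_one _ _).filter _
  have hsync := writes_sync (pvCon perm occ) _ hVnd (PySem.List.pyRange 0 (perm.length : Int) 1) 0
    (List.replicate perm.length (-1)) 0 ?_ ?_
  · rw [hsync, enumerate_pyRange_zero (perm.length : Int) (Int.natCast_nonneg _), List.foldl_map]
  · intro pv hpv
    rw [enumerate_pyRange_zero (perm.length : Int) (Int.natCast_nonneg _)] at hpv
    rcases List.mem_map.1 hpv with ⟨t, ht, rfl⟩
    simp only
    rw [List.mem_filter]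
    constructor
    · intro h
      exact (PySem.Set.contains_iff _ _).1 h.2
    · intro h
      exact ⟨ht, (PySem.Set.contains_iff _ _).2 h⟩
  · have h0 : ((PySem.List.pyRange 0 (perm.length : Int) 1).filter
        (fun t => PySem.Set.contains (pvCon perm occ) t)).countP (fun q => decide (q < (0 : Int))) = 0 := by
      rw [List.countP_eq_zero]
      intro q hq
      have := (PySem.List.mem_pyRange_one.1 (List.mem_of_mem_filter hq)).1
      simp only [decide_eq_true_eq]
      omega
    rw [h0]
    simp

-- ===== VERDICT (by name: the statement is the Claim_ definition above) =====
theorem maximal_mesh_pattern_of_occurrence_spec : Claim_equal_maximal_mesh_pattern_of_occurrence := by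
  intro perm occ _hdom _hpre
  unfold Spec_maximal_mesh_pattern_of_occurrence
  simp only [maximal_mesh_pattern_of_occurrence, maximal_mesh_pattern_of_occurrence_alt]
  rw [col_eq perm occ, row_eq perm occ]
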